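-- pv_equiv track=rewrite | github.com/ddoddii/algorithm | python/Problems/company/onboarding_in_python/#7.py | updateFriendScore
-- ===== SOURCE A (Python) =====
-- def updateFriendScore(visitors, usr_friend, friend_score):
--
--     for visitor in visitors:
--         if visitor not in usr_friend:
--             try:
--                 friend_score[visitor] += 1
--             except KeyError:
--                 friend_score[visitor] = 1
--
--     return friend_score
-- ===== SOURCE B (Python) =====
-- def updateFriendScore(visitors, usr_friend, friend_score):
--     # Per-key totals instead of per-visitor increments: filter out friends,
--     # then write each distinct non-friend visitor's full count exactly once.
--     # Mutates friend_score in place (like A) and returns it.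
--     tallied = [v for v in visitors if v not in usr_friend]
--     for k in dict.fromkeys(tallied):
--         friend_score[k] = friend_score.get(k, 0) + tallied.count(k)
--     return friend_score
-- ===== Notes on version B (the rewrite author's own statement) =====
-- stated objective: alternative
-- what changed: A bumps friend_score once per visitor inside one incremental scan with try/except; B instead filters out friends, deduplicates the remaining visitors (dict.fromkeys), and writes each distinct key exactly once with its total obtained by list.count.
import Mathlib
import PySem

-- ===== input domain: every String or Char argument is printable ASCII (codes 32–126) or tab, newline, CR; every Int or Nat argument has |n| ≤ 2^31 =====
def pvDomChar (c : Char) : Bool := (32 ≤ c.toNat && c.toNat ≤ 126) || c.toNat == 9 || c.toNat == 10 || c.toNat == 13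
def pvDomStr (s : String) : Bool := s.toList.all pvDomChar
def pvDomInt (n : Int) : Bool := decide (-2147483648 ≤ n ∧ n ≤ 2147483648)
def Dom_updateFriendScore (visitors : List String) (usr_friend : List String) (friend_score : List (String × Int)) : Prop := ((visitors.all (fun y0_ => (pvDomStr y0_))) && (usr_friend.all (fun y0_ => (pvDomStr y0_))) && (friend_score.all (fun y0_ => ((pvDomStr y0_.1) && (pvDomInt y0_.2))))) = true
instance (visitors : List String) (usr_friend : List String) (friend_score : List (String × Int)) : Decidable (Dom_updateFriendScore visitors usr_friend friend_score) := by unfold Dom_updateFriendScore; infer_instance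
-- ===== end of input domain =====

-- B replaces A's per-visitor incremental bumps with filter → dedup → one write per distinct key with its
-- total from list.count; like A, the Python B mutates friend_score in place — the theorems are about the return value.

-- ===== PORT A =====
def updateFriendScore (visitors : List String) (usr_friend : List String) (friend_score : List (String × Int)) : List (String × Int) :=
  (visitors.foldl
    (fun d visitor =>
      if visitor ∉ usr_friend then
        -- try: friend_score[visitor] += 1 / except KeyError: friend_score[visitor] = 1
        match d.get? visitor with
        | some x => d.insert visitor (x + 1)
        | none   => d.insert visitor 1
      else d)
    (PySem.Dict.ofList friend_score)).items

-- ===== PORT B =====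
def updateFriendScore_alt (visitors : List String) (usr_friend : List String) (friend_score : List (String × Int)) : List (String × Int) :=
  -- tallied = [v for v in visitors if v not in usr_friend]
  let tallied := visitors.filter (fun v => decide (v ∉ usr_friend))
  -- for k in dict.fromkeys(tallied): friend_score[k] = friend_score.get(k, 0) + tallied.count(k)
  ((PySem.List.dedup tallied).foldl
    (fun d k => d.insert k (d.getD k 0 + (PySem.List.count tallied k : Int)))
    (PySem.Dict.ofList friend_score)).items

-- ===== PRECONDITION & SPEC =====
def Spec_updateFriendScore (visitors : List String) (usr_friend : List String) (friend_score : List (String × Int)) (out : List (String × Int)) : Prop := out = updateFriendScore_alt visitors usr_friend friend_score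
instance (visitors : List String) (usr_friend : List String) (friend_score : List (String × Int)) (out : List (String × Int)) : Decidable (Spec_updateFriendScore visitors usr_friend friend_score out) := by unfold Spec_updateFriendScore; infer_instance

-- ===== CLAIM (what is proved, stated in full; the proofs are below) =====
def Claim_equal_updateFriendScore : Prop := ∀ (visitors : List String) (usr_friend : List String) (friend_score : List (String × Int)), Dom_updateFriendScore visitors usr_friend friend_score → Spec_updateFriendScore visitors usr_friend friend_score (updateFriendScore visitors usr_friend friend_score)

-- ===== LEMMAS AND PROOFS =====

/-- B's write step `friend_score[k] = friend_score.get(k, 0) + c`, over a (key, count) pair. -/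
def pvMerge (d : PySem.Dict String Int) (p : String × Int) : PySem.Dict String Int :=
  d.insert p.1 (d.getD p.1 0 + p.2)

/-- The bump step `d[v] = d.get(v, 0) + 1` that A's scan performs per visitor. -/
def pvStep (c : PySem.Dict String Int) (v : String) : PySem.Dict String Int :=
  c.insert v (c.getD v 0 + 1)

/-- A's guarded scan is the bump-step fold over the filtered visitor list. -/
theorem pv_A_eq (visitors usr_friend : List String) (friend_score : List (String × Int)) :
    updateFriendScore visitors usr_friend friend_score
      = ((visitors.filter (fun v => decide (v ∉ usr_friend))).foldl pvStep
          (PySem.Dict.ofList friend_score)).items := by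
  unfold updateFriendScore
  congr 1
  rw [List.foldl_filter]
  generalize PySem.Dict.ofList friend_score = d
  induction visitors generalizing d with
  | nil => rfl
  | cons v vs ih =>
      simp only [List.foldl_cons]
      rw [← ih]
      congr 1
      by_cases h : v ∉ usr_friend
      · simp only [if_pos h, decide_eq_true h, if_true]
        cases hg : d.get? v <;>
          simp [pvStep, PySem.Dict.getD_eq_get?_getD, hg]
      · simp [h]

/-- Merging entries whose keys avoid `w` does not change the value at `w`. -/
theorem pv_getD_foldl_merge (l : List (String × Int)) (e : PySem.Dict String Int)
    (w : String) (h : ∀ p ∈ l, p.1 ≠ w) :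
    (l.foldl pvMerge e).getD w 0 = e.getD w 0 := by
  induction l generalizing e with
  | nil => rfl
  | cons q l ih =>
      simp only [List.foldl_cons]
      rw [ih _ (fun p hp => h p (List.mem_cons_of_mem _ hp))]
      exact PySem.Dict.getD_insert_of_ne _ _ _ (Ne.symm (h q List.mem_cons_self))

/-- Overwriting an already-present key commutes with inserting a different key. -/
theorem pv_insert_insert_comm (e : PySem.Dict String Int) (w k : String) (val u : Int)
    (hw : e.contains w = true) (hk : k ≠ w) :
    (e.insert w val).insert k u = (e.insert k u).insert w val := by
  apply PySem.Dict.ext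
  have hck : (e.insert w val).contains k = e.contains k := by
    rw [PySem.Dict.contains_insert]; simp [hk]
  have hcw : (e.insert k u).contains w = true := by
    rw [PySem.Dict.contains_insert]; simp [hw]
  cases hke : e.contains k with
  | true =>
      rw [PySem.Dict.items_insert_of_contains _ _ (by rw [hck]; exact hke),
          PySem.Dict.items_insert_of_contains _ _ hw,
          PySem.Dict.items_insert_of_contains _ _ hcw,
          PySem.Dict.items_insert_of_contains _ _ hke,
          List.map_map, List.map_map]
      apply List.map_congr_left
      intro p _
      simp only [Function.comp_apply]
      by_cases hpw : p.1 = w <;> by_cases hpk : p.1 = k <;>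
        simp [hpw, hpk, hk, Ne.symm hk]
  | false =>
      rw [PySem.Dict.items_insert_of_not_contains _ _ (by rw [hck]; exact hke),
          PySem.Dict.items_insert_of_contains _ _ hw,
          PySem.Dict.items_insert_of_contains _ _ hcw,
          PySem.Dict.items_insert_of_not_contains _ _ hke,
          List.map_append]
      simp [hk]

/-- Overwriting an already-present key `w` commutes out of a merge fold avoiding `w`. -/
theorem pv_foldl_merge_insert_comm (l : List (String × Int)) (e : PySem.Dict String Int)
    (w : String) (val : Int) (hl : ∀ p ∈ l, p.1 ≠ w) (hw : e.contains w = true) :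
    l.foldl pvMerge (e.insert w val) = (l.foldl pvMerge e).insert w val := by
  induction l generalizing e with
  | nil => rfl
  | cons q l ih =>
      simp only [List.foldl_cons]
      have hq : q.1 ≠ w := hl q List.mem_cons_self
      have h1 : pvMerge (e.insert w val) q = (pvMerge e q).insert w val := by
        unfold pvMerge
        rw [PySem.Dict.getD_insert_of_ne _ _ _ hq]
        exact pv_insert_insert_comm e w q.1 val _ hw hq
      rw [h1]
      exact ih (pvMerge e q) (fun p hp => hl p (List.mem_cons_of_mem _ hp))
        (by unfold pvMerge; rw [PySem.Dict.contains_insert]; simp [hw])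

/-- Bumping the (unique) entry at key `w` before the merge fold equals bumping afterwards. -/
theorem pv_foldl_merge_map_bump (l : List (String × Int)) (d : PySem.Dict String Int)
    (w : String) (hmem : w ∈ l.map Prod.fst) (hnd : (l.map Prod.fst).Nodup) :
    (l.map (fun p => if p.1 = w then (p.1, p.2 + 1) else p)).foldl pvMerge d
      = (l.foldl pvMerge d).insert w ((l.foldl pvMerge d).getD w 0 + 1) := by
  induction l generalizing d with
  | nil => simp at hmem
  | cons q l ih =>
      simp only [List.map_cons, List.foldl_cons]
      by_cases hqw : q.1 = w
      · have hlw : ∀ p ∈ l, p.1 ≠ w := by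
          intro p hp hc
          have h1 : q.1 ∉ l.map Prod.fst := (List.nodup_cons.mp (by simpa using hnd)).1
          exact h1 (by rw [hqw, ← hc]; exact List.mem_map_of_mem hp)
        have hmapid : l.map (fun p => if p.1 = w then (p.1, p.2 + 1) else p) = l := by
          rw [List.map_congr_left (fun p hp => if_neg (fun h => hlw p hp h))]
          simp
        rw [if_pos hqw, hmapid]
        subst hqw
        have hF : (l.foldl pvMerge (pvMerge d q)).getD q.1 0 = d.getD q.1 0 + q.2 := by
          rw [pv_getD_foldl_merge l _ _ hlw]
          unfold pvMerge
          simp [PySem.Dict.getD_insert_self]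
        rw [hF]
        have h2 : pvMerge d (q.1, q.2 + 1)
            = (pvMerge d q).insert q.1 (d.getD q.1 0 + q.2 + 1) := by
          unfold pvMerge
          rw [PySem.Dict.insert_insert_self]
          congr 1
          ring
        rw [h2]
        exact pv_foldl_merge_insert_comm l (pvMerge d q) q.1 _ hlw
          (by unfold pvMerge; simp [PySem.Dict.contains_insert_self])
      · rw [if_neg hqw]
        have hmem' : w ∈ l.map Prod.fst := by
          rcases (by simpa using hmem : w = q.1 ∨ w ∈ l.map Prod.fst) with h | h
          · exact absurd h.symm hqw
          · exact h
        exact ih (pvMerge d q) hmem' (List.nodup_cons.mp (by simpa using hnd)).2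

/-- `dedup` over an appended element: kept only if new. -/
theorem pv_dedup_append (ws : List String) (w : String) :
    PySem.List.dedup (ws ++ [w]) = if w ∈ ws then PySem.List.dedup ws else PySem.List.dedup ws ++ [w] := by
  have h1 : PySem.List.dedup (ws ++ [w]) = PySem.Set.add (PySem.List.dedup ws) w := by
    simp only [PySem.List.dedup_eq_ofList, PySem.Set.ofList_eq_foldl, List.foldl_append,
      List.foldl_cons, List.foldl_nil]
  rw [h1]
  unfold PySem.Set.add
  simp only [PySem.List.dedup_eq_ofList, PySem.Set.contains, List.contains_eq_mem,
    PySem.Set.mem_ofList]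
  by_cases h : w ∈ ws <;> simp [h]

/-- The heart: B's one-write-per-distinct-key fold equals A's per-occurrence bump fold. -/
theorem pv_dedup_count (ws : List String) (d : PySem.Dict String Int) :
    (PySem.List.dedup ws).foldl
        (fun d k => d.insert k (d.getD k 0 + (PySem.List.count ws k : Int))) d
      = ws.foldl pvStep d := by
  simp only [PySem.List.count_eq]
  induction ws using List.reverseRecOn with
  | nil => rfl
  | append_singleton ws w ih =>
    have hmap : ∀ (vs ks : List String),
        ks.foldl (fun d k => d.insert k (d.getD k 0 + (vs.count k : Int))) d
          = (ks.map (fun k => (k, (vs.count k : Int)))).foldl pvMerge d := by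
      intro vs ks; rw [List.foldl_map]; rfl
    rw [List.foldl_append, List.foldl_cons, List.foldl_nil, hmap, pv_dedup_append]
    by_cases h : w ∈ ws
    · rw [if_pos h]
      have hcongr : (PySem.List.dedup ws).map (fun k => (k, (((ws ++ [w]).count k : Nat) : Int)))
          = ((PySem.List.dedup ws).map (fun k => (k, (ws.count k : Int)))).map
              (fun p => if p.1 = w then (p.1, p.2 + 1) else p) := by
        rw [List.map_map]
        apply List.map_congr_left
        intro k _
        simp only [Function.comp_apply, List.count_append, List.count_singleton]
        by_cases hk : k = w
        · subst hk; simp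
        · simp [hk, Ne.symm hk]
      rw [hcongr, pv_foldl_merge_map_bump _ _ w
            (by rw [List.map_map]; simpa [Function.comp_def] using (PySem.List.mem_dedup ws w).mpr h)
            (by rw [List.map_map]; simp [Function.comp_def]),
          ← hmap, ih]
      rfl
    · rw [if_neg h]
      have hcongr : (PySem.List.dedup ws ++ [w]).map (fun k => (k, (((ws ++ [w]).count k : Nat) : Int)))
          = (PySem.List.dedup ws).map (fun k => (k, (ws.count k : Int))) ++ [(w, 1)] := by
        rw [List.map_append]
        congr 1
        · apply List.map_congr_left
          intro k hk
          have hkw : k ≠ w := fun hc => h (by rw [← hc]; exact (PySem.List.mem_dedup ws k).mp hk)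
          simp [List.count_append, Ne.symm hkw]
        · simp [List.count_append, List.count_singleton, List.count_eq_zero_of_not_mem h]
      rw [hcongr, List.foldl_append, ← hmap, ih]
      simp only [List.foldl_cons, List.foldl_nil]
      rfl

-- ===== VERDICT (by name: the statement is the Claim_ definition above) =====
theorem updateFriendScore_spec : Claim_equal_updateFriendScore := by
  intro visitors usr_friend friend_score _
  unfold Spec_updateFriendScore updateFriendScore_alt
  rw [pv_A_eq, ← pv_dedup_count]
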